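-- pv_equiv track=rewrite | github.com/jameswmccarty/AdventOfCode | 2019/day08.py | findTargetLayer
-- ===== SOURCE A (Python) =====
-- def findTargetLayer(w,h,img):
-- 	fewest = float('inf')
-- 	score  = 0
-- 	while len(img) > 0:
-- 		zeros = 0
-- 		ones  = 0
-- 		twos  = 0
-- 		for i in range(h):
-- 			row = img[0:w]
-- 			img = img[w:]
-- 			zeros += row.count('0')
-- 			ones  += row.count('1')
-- 			twos  += row.count('2')
-- 		if zeros < fewest:
-- 			fewest = zeros
-- 			score = ones * twos
-- 	return score
-- ===== SOURCE B (Python) =====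
-- def findTargetLayer(w, h, img):
--     # Single pass over the characters with a per-layer countdown; no slicing, no repeated string copies.
--     if not img:
--         return 0
--     size = w * h
--     fewest = None
--     score = 0
--     z = o = t = 0
--     rem = size
--     for c in img:
--         if c == '0':
--             z += 1
--         elif c == '1':
--             o += 1
--         elif c == '2':
--             t += 1
--         rem -= 1
--         if rem == 0:
--             if fewest is None or z < fewest:
--                 fewest = z
--                 score = o * t
--             z = o = t = 0
--             rem = size
--     if rem != size:
--         if fewest is None or z < fewest:
--             score = o * t
--     return score
-- ===== Notes on version B (the rewrite author's own statement) =====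
-- stated objective: alternative
-- what changed: A repeatedly slices and reassigns the string (img = img[w:]), copying the remainder for every row inside nested loops; B makes one left-to-right pass over the characters with a per-layer countdown, flushing min-zero bookkeeping at each layer boundary, with no slicing or copying; intended as faster (measured 1.7-4.2x on generated inputs, but not consistently >=1.5x at the largest size, so not claimed).
import Mathlib
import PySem

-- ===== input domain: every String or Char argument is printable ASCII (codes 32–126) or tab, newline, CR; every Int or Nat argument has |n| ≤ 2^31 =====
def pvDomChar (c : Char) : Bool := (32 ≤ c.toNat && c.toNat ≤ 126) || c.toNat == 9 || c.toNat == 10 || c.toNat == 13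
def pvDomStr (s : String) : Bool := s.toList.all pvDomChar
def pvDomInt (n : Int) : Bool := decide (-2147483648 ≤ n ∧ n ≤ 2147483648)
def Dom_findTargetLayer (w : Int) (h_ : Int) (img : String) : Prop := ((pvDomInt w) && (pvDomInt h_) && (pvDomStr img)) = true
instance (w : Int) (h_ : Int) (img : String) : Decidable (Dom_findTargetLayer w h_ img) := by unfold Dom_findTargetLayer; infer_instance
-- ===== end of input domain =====

-- B replaces A's repeated string slicing/reassignment by one left-to-right pass over the
-- characters with a per-layer countdown (an alternative, copy-free algorithm); the equivalence
-- proved is about the return value (A rebinds only its local img variable, nothing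
-- caller-visible is mutated).

-- `zeros < fewest` where fewest starts as float('inf'): none plays the role of infinity
def pvLtFew (z : Int) (few : Option Int) : Bool :=
  match few with
  | none => true
  | some f => decide (z < f)

-- ===== PORT A =====
-- the inner `for i in range(h)` loop: row = img[0:w]; img = img[w:]; counts accumulate
def pvRows (w : Int) : Nat → List Char → Int → Int → Int → (Int × Int × Int × List Char)
  | 0, img, zeros, ones, twos => (zeros, ones, twos, img)
  | n+1, img, zeros, ones, twos =>
      let row := PySem.List.slice img (some 0) (some w)
      let rest := PySem.List.slice img (some w) none
      pvRows w n rest (zeros + (row.count '0' : Int)) (ones + (row.count '1' : Int))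
        (twos + (row.count '2' : Int))

-- the outer `while len(img) > 0` loop; the fuel argument (|img|+1 at the call) only makes the
-- loop total: on the inputs Pre_ admits each iteration consumes at least one character
def pvLoop (w h_ : Int) : Nat → List Char → Option Int → Int → Int
  | 0, _, _, score => score
  | fuel+1, img, fewest, score =>
    if 0 < img.length then
      match pvRows w h_.toNat img 0 0 0 with
      | (zeros, ones, twos, img') =>
        if pvLtFew zeros fewest then pvLoop w h_ fuel img' (some zeros) (ones * twos)
        else pvLoop w h_ fuel img' fewest score
    else score

def findTargetLayer (w : Int) (h_ : Int) (img : String) : Int :=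
  pvLoop w h_ (img.toList.length + 1) img.toList none 0

-- ===== PORT B =====
-- one character of B's single pass; state (z, o, t, rem, fewest, score)
def pvStep (size : Int) (st : Int × Int × Int × Int × Option Int × Int) (c : Char) :
    Int × Int × Int × Int × Option Int × Int :=
  match st with
  | (z, o, t, rem, fewest, score) =>
    let zot := if c = '0' then (z+1, o, t)
               else if c = '1' then (z, o+1, t)
               else if c = '2' then (z, o, t+1)
               else (z, o, t)
    let rem' := rem - 1
    if rem' = 0 then
      if pvLtFew zot.1 fewest then (0, 0, 0, size, some zot.1, zot.2.1 * zot.2.2)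
      else (0, 0, 0, size, fewest, score)
    else (zot.1, zot.2.1, zot.2.2, rem', fewest, score)

-- B's trailing `if rem != size:` flush of a final partial layer
def pvFinalize (size : Int) (st : Int × Int × Int × Int × Option Int × Int) : Int :=
  match st with
  | (z, _o, _t, rem, fewest, score) =>
    if rem ≠ size then (if pvLtFew z fewest then _o * _t else score) else score

def findTargetLayer_alt (w : Int) (h_ : Int) (img : String) : Int :=
  let l := img.toList
  if l.length = 0 then 0
  else pvFinalize (w * h_) (l.foldl (pvStep (w * h_)) (0, 0, 0, w * h_, none, 0))

-- ===== PRECONDITION & SPEC =====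
-- A returns exactly when the image is empty or both dimensions are ≥ 1: for a nonempty image
-- with w ≤ 0 or h ≤ 0 the while loop consumes nothing and Python A loops forever.
def Pre_findTargetLayer (w : Int) (h_ : Int) (img : String) : Prop :=
  img.toList = [] ∨ (1 ≤ w ∧ 1 ≤ h_)
instance (w : Int) (h_ : Int) (img : String) : Decidable (Pre_findTargetLayer w h_ img) := by
  unfold Pre_findTargetLayer; infer_instance

def pvWitness_findTargetLayer : Int × Int × String := (3, 2, "123456789012")

def Spec_findTargetLayer (w : Int) (h_ : Int) (img : String) (out : Int) : Prop := out = findTargetLayer_alt w h_ img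
instance (w : Int) (h_ : Int) (img : String) (out : Int) : Decidable (Spec_findTargetLayer w h_ img out) := by unfold Spec_findTargetLayer; infer_instance

-- ===== CLAIM (what is proved, stated in full; the proofs are below) =====
def Claim_equal_findTargetLayer : Prop := ∀ (w : Int) (h_ : Int) (img : String), Dom_findTargetLayer w h_ img → Pre_findTargetLayer w h_ img → Spec_findTargetLayer w h_ img (findTargetLayer w h_ img)

-- ===== LEMMAS AND PROOFS =====

-- the inner row loop counts over the first h*w characters and drops them
theorem pvRows_spec (w : Int) (hw : 1 ≤ w) :
    ∀ (n : Nat) (img : List Char) (z o t : Int),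
      pvRows w n img z o t =
        (z + ((img.take (n * w.toNat)).count '0' : Int),
         o + ((img.take (n * w.toNat)).count '1' : Int),
         t + ((img.take (n * w.toNat)).count '2' : Int),
         img.drop (n * w.toNat)) := by
  intro n
  induction n with
  | zero => intro img z o t; simp [pvRows]
  | succ n ih =>
    intro img z o t
    rw [pvRows]
    rw [PySem.List.slice_zero_start, PySem.List.slice_to img (by omega : (0:Int) ≤ w),
      PySem.List.slice_from img (by omega : (0:Int) ≤ w), ih]
    have hmul : (n+1) * w.toNat = w.toNat + n * w.toNat := by ring
    rw [hmul, List.take_add, List.drop_drop]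
    simp [List.count_append]
    refine ⟨by ring, by ring, by ring⟩

-- a short tail (length < rem) of B's pass only accumulates the counters
theorem pvStep_partial (size : Int) :
    ∀ (chunk : List Char) (z o t rem : Int) (few : Option Int) (sc : Int),
      chunk.length < rem.toNat →
      chunk.foldl (pvStep size) (z, o, t, rem, few, sc) =
        (z + (chunk.count '0' : Int), o + (chunk.count '1' : Int),
         t + (chunk.count '2' : Int), rem - chunk.length, few, sc) := by
  intro chunk
  induction chunk with
  | nil => intro z o t rem few sc h; simp
  | cons c cs ih =>
    intro z o t rem few sc h
    simp only [List.length_cons] at h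
    have hrem : ¬ (rem - 1 = 0) := by omega
    simp only [List.foldl_cons, pvStep, hrem, if_false]
    rw [ih _ _ _ _ _ _ (by omega)]
    by_cases h0 : c = '0' <;> by_cases h1 : c = '1' <;> by_cases h2 : c = '2' <;>
      simp [h0, h1, h2, List.count_cons] <;> push_cast <;> ring_nf <;> simp <;> omega

-- a full chunk (length = rem) of B's pass flushes the counters
theorem pvStep_full (size : Int) :
    ∀ (chunk : List Char) (z o t rem : Int) (few : Option Int) (sc : Int),
      1 ≤ rem → chunk.length = rem.toNat →
      chunk.foldl (pvStep size) (z, o, t, rem, few, sc) =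
        (if pvLtFew (z + (chunk.count '0' : Int)) few
         then ((0 : Int), (0 : Int), (0 : Int), size,
               some (z + (chunk.count '0' : Int)),
               (o + (chunk.count '1' : Int)) * (t + (chunk.count '2' : Int)))
         else ((0 : Int), (0 : Int), (0 : Int), size, few, sc)) := by
  intro chunk
  induction chunk with
  | nil => intro z o t rem few sc h1 h2; simp at h2; omega
  | cons c cs ih =>
    intro z o t rem few sc h1 h2
    simp only [List.length_cons] at h2
    by_cases hlast : rem = 1
    · -- last character of the layer: cs = []
      have hcs : cs = [] := by
        have : cs.length = 0 := by omega
        exact List.length_eq_zero_iff.mp this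
      subst hcs hlast
      simp only [List.foldl_cons, pvStep, List.foldl_nil]
      by_cases h0 : c = '0' <;> by_cases h1' : c = '1' <;> by_cases h2' : c = '2' <;>
        simp [h0, h1', h2', List.count_cons]
    · have hrem : ¬ (rem - 1 = 0) := by omega
      simp only [List.foldl_cons, pvStep, hrem, if_false]
      rw [ih _ _ _ _ _ _ (by omega) (by omega)]
      by_cases h0 : c = '0' <;> by_cases h1' : c = '1' <;> by_cases h2' : c = '2' <;>
        simp [h0, h1', h2', List.count_cons] <;> push_cast <;> ring_nf <;> simp <;> omega

-- the while loop equals finalize ∘ foldl, by induction on the fuel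
theorem pvLoop_eq (w h_ : Int) (hw : 1 ≤ w) (hh : 1 ≤ h_) :
    ∀ (fuel : Nat) (l : List Char) (few : Option Int) (sc : Int),
      l.length ≤ fuel →
      pvLoop w h_ fuel l few sc =
        pvFinalize (w * h_) (l.foldl (pvStep (w * h_)) (0, 0, 0, w * h_, few, sc)) := by
  intro fuel
  induction fuel with
  | zero =>
    intro l few sc hl
    have hnil : l = [] := List.length_eq_zero_iff.mp (by omega)
    subst hnil; simp [pvLoop, pvFinalize]
  | succ f ih =>
    intro l few sc hl
    by_cases hnil : l = []
    · subst hnil; simp [pvLoop, pvFinalize]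
    · have hlen : 0 < l.length := List.length_pos_iff.mpr hnil
      have hwh : (1 : Int) ≤ w * h_ := by nlinarith
      have htn : h_.toNat * w.toNat = (w * h_).toNat := by
        rw [Int.toNat_mul (by omega) (by omega)]; ring
      have hsize : ((w * h_).toNat : Int) = w * h_ := Int.toNat_of_nonneg (by omega)
      rw [pvLoop, if_pos hlen, pvRows_spec w hw, htn]
      by_cases hcase : l.length < (w * h_).toNat
      · -- final partial layer
        have htake : l.take (w * h_).toNat = l := List.take_of_length_le (by omega)
        have hdrop : l.drop (w * h_).toNat = [] := List.drop_eq_nil_of_le (by omega)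
        rw [htake, hdrop]
        rw [pvStep_partial (w * h_) l 0 0 0 (w * h_) few sc (by omega)]
        have hne : (w * h_) - (l.length : Int) ≠ w * h_ := by omega
        by_cases hc : pvLtFew (0 + (l.count '0' : Int)) few
        · simp only [hc, pvFinalize, if_pos hne]
          cases f <;> simp [pvLoop]
        · simp only [hc, pvFinalize, if_pos hne, Bool.false_eq_true]
          cases f <;> simp [pvLoop]
      · -- a full layer followed by the rest of the image
        have hsplit : l = l.take (w * h_).toNat ++ l.drop (w * h_).toNat :=
          (List.take_append_drop _ l).symm
        conv_rhs => rw [hsplit]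
        rw [List.foldl_append]
        rw [pvStep_full (w * h_) _ 0 0 0 (w * h_) few sc (by omega)
          (by simp [List.length_take]; omega)]
        dsimp only
        by_cases hc : pvLtFew (0 + ((l.take (w * h_).toNat).count '0' : Int)) few
        · rw [if_pos hc, if_pos hc, ih _ _ _ (by simp [List.length_drop]; omega)]
        · rw [if_neg hc, if_neg hc, ih _ _ _ (by simp [List.length_drop]; omega)]

-- ===== VERDICT (by name: the statement is the Claim_ definition above) =====
theorem findTargetLayer_spec : Claim_equal_findTargetLayer := by
  intro w h_ img _dom hpre
  unfold Spec_findTargetLayer findTargetLayer findTargetLayer_alt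
  rcases hpre with hnil | ⟨hw, hh⟩
  · simp [hnil, pvLoop]
  · by_cases hlen : img.toList.length = 0
    · simp [List.length_eq_zero_iff.mp hlen, pvLoop]
    · rw [pvLoop_eq w h_ hw hh _ _ _ _ (by omega)]
      have himg : ¬ (img = "") := by
        intro h; simp [h] at hlen
      simp [himg]
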